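-- pv_equiv track=rewrite | github.com/rrwt/daily-coding-challenge | daily_problems/problem_101_to_200/problem_194.py | num_intersections
-- ===== SOURCE A (Python) =====
-- from typing import List
--
-- def num_intersections(p: List[int], q: List[int]) -> int:
--     size = len(p)
--     count = 0
--
--     for i in range(size - 1):
--         for j in range(i + 1, size):
--             if (p[i] < p[j] and q[i] < q[j]) or (p[i] > p[j] and q[i] > q[j]):
--                 continue
--             count += 1
--
--     return count
-- ===== SOURCE B (Python) =====
-- def num_intersections(p, q):
--     # sort the lines by (p ascending, q descending); a pair intersects exactly
--     # when, in this order, the later q is <= the earlier q, so the answer is the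
--     # number of non-ascents in qs, counted by merge sort in O(n log n).
--     pairs = sorted(zip(p, q), key=lambda t: (t[0], -t[1]))
--     qs = [b for _, b in pairs]
--     return _sort_count(qs)[1]
--
--
-- def _sort_count(a):
--     """Sort a; also count pairs i < j with a[i] >= a[j]."""
--     n = len(a)
--     if n <= 1:
--         return a, 0
--     left, c1 = _sort_count(a[:n // 2])
--     right, c2 = _sort_count(a[n // 2:])
--     merged = []
--     count = c1 + c2
--     i = j = 0
--     while i < len(left) and j < len(right):
--         if left[i] < right[j]:
--             merged.append(left[i])
--             i += 1
--         else:
--             count += len(left) - i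
--             merged.append(right[j])
--             j += 1
--     merged.extend(left[i:])
--     merged.extend(right[j:])
--     return merged, count
-- ===== Notes on version B (the rewrite author's own statement) =====
-- stated objective: faster
-- what changed: Replaces A's quadratic scan over all index pairs by sorting the (p,q) pairs by (p ascending, q descending) and counting the non-ascending q-pairs with a merge-sort inversion count.
-- outside the precondition, e.g. on num_intersections([5, 5], []): A returns 1, B returns 0; on num_intersections([0, 1], []): A raises IndexError, B returns 0
import Mathlib
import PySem

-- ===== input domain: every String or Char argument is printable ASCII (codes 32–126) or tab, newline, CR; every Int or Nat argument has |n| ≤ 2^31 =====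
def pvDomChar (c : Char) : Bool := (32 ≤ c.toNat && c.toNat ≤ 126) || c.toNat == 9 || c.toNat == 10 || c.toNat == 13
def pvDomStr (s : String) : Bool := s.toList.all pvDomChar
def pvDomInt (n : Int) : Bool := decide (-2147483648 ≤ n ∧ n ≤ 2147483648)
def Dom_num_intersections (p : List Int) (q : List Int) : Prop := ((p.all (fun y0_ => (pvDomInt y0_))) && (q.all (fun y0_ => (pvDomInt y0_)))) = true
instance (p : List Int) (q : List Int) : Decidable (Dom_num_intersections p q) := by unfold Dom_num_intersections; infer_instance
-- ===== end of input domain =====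

-- B replaces A's quadratic all-pairs scan with sort-then-merge-sort inversion counting; return value only, neither version mutates its arguments.

-- ===== PORT A =====
def num_intersections (p : List Int) (q : List Int) : Int :=
  let size : Int := p.length
  (PySem.List.pyRange 0 (size - 1)).foldl
    (fun count i =>
      (PySem.List.pyRange (i + 1) size).foldl
        (fun count j =>
          if (PySem.List.pyGetD p i 0 < PySem.List.pyGetD p j 0 ∧
              PySem.List.pyGetD q i 0 < PySem.List.pyGetD q j 0) ∨
             (PySem.List.pyGetD p i 0 > PySem.List.pyGetD p j 0 ∧
              PySem.List.pyGetD q i 0 > PySem.List.pyGetD q j 0) then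
            count
          else
            count + 1)
        count)
    0

-- ===== PORT B =====
-- Source B's iterative two-pointer merge loop, ported as the equivalent structural recursion on the
-- two list suffixes (same comparison, same output order, same count increments).
def mergeCountB : List Int → List Int → List Int × Int
  | [], r => (r, 0)
  | x :: l, [] => (x :: l, 0)
  | x :: l, y :: r =>
    if x < y then
      let res := mergeCountB l (y :: r)
      (x :: res.1, res.2)
    else
      let res := mergeCountB (x :: l) r
      (y :: res.1, res.2 + ((x :: l).length : Int))
termination_by l r => l.length + r.length

-- Source B's _sort_count; the slices a[:n//2] / a[n//2:] are List.take / List.drop.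
def sortCountB (a : List Int) : List Int × Int :=
  if _h : a.length ≤ 1 then (a, 0)
  else
    let res₁ := sortCountB (a.take (a.length / 2))
    let res₂ := sortCountB (a.drop (a.length / 2))
    let m := mergeCountB res₁.1 res₂.1
    (m.1, res₁.2 + res₂.2 + m.2)
termination_by a.length
decreasing_by
  · simp only [List.length_take]; omega
  · simp only [List.length_drop]; omega

-- Python's tuple key (t[0], -t[1]) compares lexicographically: modelled by the Lex product order.
def num_intersections_alt (p : List Int) (q : List Int) : Int :=
  let pairs := PySem.List.sorted (p.zip q) (fun t => toLex (t.1, -t.2))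
  let qs := pairs.map (fun t => t.2)
  (sortCountB qs).2

-- ===== PRECONDITION & SPEC =====
-- Pre_ excludes inputs where q is shorter than p (with p holding two or more lines): there A raises
-- IndexError, except on the accidental corner where every out-of-range q index is guarded by a tie
-- in p (short-circuit of Python's 'and'), where A's value is an artefact and B zip-truncates.
def Pre_num_intersections (p : List Int) (q : List Int) : Prop :=
  p.length ≤ q.length ∨ p.length ≤ 1
instance (p : List Int) (q : List Int) : Decidable (Pre_num_intersections p q) := by
  unfold Pre_num_intersections; infer_instance

def pvWitness_num_intersections : List Int × List Int := ([1, 2], [2, 1])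

def Spec_num_intersections (p : List Int) (q : List Int) (out : Int) : Prop := out = num_intersections_alt p q
instance (p : List Int) (q : List Int) (out : Int) : Decidable (Spec_num_intersections p q out) := by unfold Spec_num_intersections; infer_instance

-- ===== CLAIM (what is proved, stated in full; the proofs are below) =====
def Claim_equal_num_intersections : Prop := ∀ (p : List Int) (q : List Int), Dom_num_intersections p q → Pre_num_intersections p q → Spec_num_intersections p q (num_intersections p q)


-- ===== LEMMAS AND PROOFS =====

-- pvPc R l counts the index pairs i < j of l with R l[i] l[j]
def pvPc {α : Type} (R : α → α → Bool) : List α → Int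
  | [] => 0
  | x :: xs => ((xs.countP (R x) : Nat) : Int) + pvPc R xs

-- "the pair of lines a, b intersects" (not strictly concordant)
def pvNotConc (a b : Int × Int) : Bool :=
  !((decide (a.1 < b.1) && decide (a.2 < b.2)) || (decide (a.1 > b.1) && decide (a.2 > b.2)))

def pvGe (x y : Int) : Bool := decide (y ≤ x)

-- cross pairs (a from l, b from r) satisfying R
def pvCross {α : Type} (R : α → α → Bool) (l r : List α) : Int :=
  (l.map (fun x => ((r.countP (R x) : Nat) : Int))).sum

lemma pvNotConc_symm (a b : Int × Int) : pvNotConc a b = pvNotConc b a := by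
  unfold pvNotConc
  by_cases h1 : a.1 < b.1 <;> by_cases h2 : a.2 < b.2 <;>
    by_cases h3 : b.1 < a.1 <;> by_cases h4 : b.2 < a.2 <;>
      simp [h1, h2, h3, h4, gt_iff_lt]

lemma pvPc_perm {α : Type} (R : α → α → Bool) (hsym : ∀ a b, R a b = R b a)
    {l l' : List α} (h : l.Perm l') : pvPc R l = pvPc R l' := by
  induction h with
  | nil => rfl
  | cons x h ih => simp [pvPc, ih, h.countP_eq]
  | swap x y l =>
      simp only [pvPc, List.countP_cons]
      rw [hsym y x]
      cases hxy : R x y <;> simp <;> ring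
  | trans h1 h2 ih1 ih2 => omega

lemma pvPc_congr {α : Type} {R R' : α → α → Bool} {S : α → α → Prop} :
    ∀ {l : List α}, l.Pairwise S → (∀ a b, S a b → R a b = R' a b) → pvPc R l = pvPc R' l := by
  intro l
  induction l with
  | nil => intro _ _; rfl
  | cons x xs ih =>
      intro hp hc
      rcases List.pairwise_cons.mp hp with ⟨hx, hxs⟩
      simp only [pvPc, ih hxs hc]
      have : xs.countP (R x) = xs.countP (R' x) :=
        List.countP_congr (fun a ha => by rw [hc x a (hx a ha)])
      rw [this]

lemma pvPc_map {α β : Type} (R : β → β → Bool) (f : α → β) :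
    ∀ l : List α, pvPc R (l.map f) = pvPc (fun a b => R (f a) (f b)) l := by
  intro l
  induction l with
  | nil => rfl
  | cons x xs ih => simp [pvPc, ih, List.countP_map]; rfl

lemma pvCross_cons_right (l : List Int) (y : Int) (r : List Int) :
    pvCross pvGe l (y :: r) = ((l.countP (fun a => pvGe a y) : Nat) : Int) + pvCross pvGe l r := by
  induction l with
  | nil => simp [pvCross]
  | cons x xs ih =>
      simp only [pvCross, List.map_cons, List.sum_cons, List.countP_cons] at *
      cases h : pvGe x y <;> simp [h] at * <;> omega

lemma pvCross_perm_left {α : Type} (R : α → α → Bool) {l l' : List α} (r : List α)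
    (h : l.Perm l') : pvCross R l r = pvCross R l' r := by
  unfold pvCross
  exact List.Perm.sum_eq (h.map _)

lemma pvCross_perm_right {α : Type} (R : α → α → Bool) (l : List α) {r r' : List α}
    (h : r.Perm r') : pvCross R l r = pvCross R l r' := by
  unfold pvCross
  congr 1
  exact List.map_congr_left (fun x _ => by rw [h.countP_eq])

lemma pvPc_append {α : Type} (R : α → α → Bool) :
    ∀ l r : List α, pvPc R (l ++ r) = pvPc R l + pvPc R r + pvCross R l r := by
  intro l r
  induction l with
  | nil => simp [pvPc, pvCross]
  | cons x xs ih =>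
      simp only [List.cons_append, pvPc, ih, List.countP_append, pvCross, List.map_cons,
        List.sum_cons]
      push_cast
      ring

lemma mergeCountB_spec :
    ∀ L R : List Int, L.Pairwise (· ≤ ·) → R.Pairwise (· ≤ ·) →
      (mergeCountB L R).1.Perm (L ++ R) ∧ (mergeCountB L R).1.Pairwise (· ≤ ·) ∧
      (mergeCountB L R).2 = pvCross pvGe L R := by
  intro L R
  induction L, R using mergeCountB.induct with
  | case1 r =>
      intro _ hR
      refine ⟨by simp [mergeCountB], by simpa [mergeCountB] using hR, ?_⟩
      simp [mergeCountB, pvCross]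
  | case2 x l =>
      intro hL _
      refine ⟨by simp [mergeCountB], by simpa [mergeCountB] using hL, ?_⟩
      simp [mergeCountB, pvCross]
  | case3 x l y r hxy ih =>
      intro hL hR
      rcases ih (List.Pairwise.sublist (List.sublist_cons_self x l) hL) hR with ⟨hperm, hsort, hcnt⟩
      rw [mergeCountB]
      simp only [if_pos hxy]
      refine ⟨?_, ?_, ?_⟩
      · exact (hperm.cons x).trans (by simp)
      · refine List.pairwise_cons.mpr ⟨?_, hsort⟩
        intro z hz
        have hz' := hperm.mem_iff.mp hz
        rcases List.mem_append.mp hz' with h | h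
        · exact (List.pairwise_cons.mp hL).1 z h
        · rcases List.mem_cons.mp h with rfl | h
          · exact le_of_lt hxy
          · exact le_of_lt (lt_of_lt_of_le hxy ((List.pairwise_cons.mp hR).1 z h))
      · rw [hcnt]
        have hz : (y :: r).countP (pvGe x) = 0 := by
          rw [List.countP_eq_zero]
          intro z hz
          have : y ≤ z := by
            rcases List.mem_cons.mp hz with rfl | h
            · exact le_refl _
            · exact (List.pairwise_cons.mp hR).1 z h
          simp [pvGe]; omega
        simp [pvCross, hz]
  | case4 x l y r hxy ih =>
      intro hL hR
      rcases ih hL (List.Pairwise.sublist (List.sublist_cons_self y r) hR) with ⟨hperm, hsort, hcnt⟩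
      rw [mergeCountB]
      simp only [if_neg hxy]
      push Not at hxy
      refine ⟨?_, ?_, ?_⟩
      · exact (hperm.cons y).trans List.perm_middle.symm
      · refine List.pairwise_cons.mpr ⟨?_, hsort⟩
        intro z hz
        have hz' := hperm.mem_iff.mp hz
        rcases List.mem_append.mp hz' with h | h
        · rcases List.mem_cons.mp h with rfl | h
          · exact hxy
          · exact le_trans hxy ((List.pairwise_cons.mp hL).1 z h)
        · exact (List.pairwise_cons.mp hR).1 z h
      · rw [hcnt, pvCross_cons_right]
        have hall : (x :: l).countP (fun a => pvGe a y) = (x :: l).length := by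
          rw [List.countP_eq_length]
          intro z hz
          have : x ≤ z := by
            rcases List.mem_cons.mp hz with rfl | h
            · exact le_refl _
            · exact (List.pairwise_cons.mp hL).1 z h
          simp [pvGe]; omega
        rw [hall]
        ring

lemma sortCountB_spec (a : List Int) :
    (sortCountB a).1.Perm a ∧ (sortCountB a).1.Pairwise (· ≤ ·) ∧
    (sortCountB a).2 = pvPc pvGe a := by
  by_cases h : a.length ≤ 1
  · rw [sortCountB, dif_pos h]
    refine ⟨List.Perm.refl a, ?_, ?_⟩
    · match a, h with
      | [], _ => exact List.Pairwise.nil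
      | [x], _ => simp
    · match a, h with
      | [], _ => rfl
      | [x], _ => simp [pvPc]
  · have h1 := sortCountB_spec (a.take (a.length / 2))
    have h2 := sortCountB_spec (a.drop (a.length / 2))
    rcases h1 with ⟨p1, s1, c1⟩
    rcases h2 with ⟨p2, s2, c2⟩
    rcases mergeCountB_spec _ _ s1 s2 with ⟨pm, sm, cm⟩
    rw [sortCountB, dif_neg h]
    refine ⟨?_, sm, ?_⟩
    · exact pm.trans ((p1.append p2).trans (by rw [List.take_append_drop]))
    · simp only [cm, c1, c2]
      have := pvPc_append pvGe (a.take (a.length / 2)) (a.drop (a.length / 2))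
      rw [List.take_append_drop] at this
      rw [this]
      have hl : pvCross pvGe (sortCountB (a.take (a.length / 2))).1 (sortCountB (a.drop (a.length / 2))).1
          = pvCross pvGe (a.take (a.length / 2)) (a.drop (a.length / 2)) := by
        rw [pvCross_perm_left _ _ p1, pvCross_perm_right _ _ p2]
      rw [hl]
termination_by a.length
decreasing_by
  · simp only [List.length_take]; omega
  · simp only [List.length_drop]; omega

lemma alt_eq_pc (p q : List Int) :
    num_intersections_alt p q = pvPc pvNotConc (p.zip q) := by
  unfold num_intersections_alt
  have hc : ∀ a b : Int × Int, (fun t : Int × Int => toLex (t.1, -t.2)) a ≤ (fun t : Int × Int => toLex (t.1, -t.2)) b →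
      (fun a b : Int × Int => pvGe a.2 b.2) a b = pvNotConc a b := by
    intro a b hS
    rw [Prod.Lex.le_iff] at hS
    simp only [ofLex_toLex] at hS
    rcases hS with hlt | ⟨heq, hle⟩
    · have hng : ¬ (a.1 > b.1) := by omega
      by_cases h2 : a.2 < b.2 <;> simp [pvGe, pvNotConc, hlt, hng, h2] <;> omega
    · have h1 : ¬ (a.1 < b.1) := by omega
      have h2 : ¬ (a.1 > b.1) := by omega
      simp [pvGe, pvNotConc, h1, h2]
      omega
  rw [(sortCountB_spec _).2.2, pvPc_map,
    pvPc_congr (PySem.List.sorted_pairwise (p.zip q) (fun t => toLex (t.1, -t.2))) hc]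
  exact pvPc_perm pvNotConc pvNotConc_symm (PySem.List.sorted_perm (p.zip q) _ false)

def pvZget (w : List (Int × Int)) (j : Int) : Int × Int := PySem.List.pyGetD w j (0, 0)

lemma pvPc_le_one {α : Type} (R : α → α → Bool) (l : List α) (h : l.length ≤ 1) :
    pvPc R l = 0 := by
  match l, h with
  | [], _ => rfl
  | [x], _ => simp [pvPc]

lemma pvRange_nil (a b : Int) (h : b ≤ a) : PySem.List.pyRange a b = [] := by
  simp [PySem.List.pyRange]
  omega

lemma pvInner (w : List (Int × Int)) (x : Int × Int) :
    ∀ (fuel k : Nat) (c : Int), w.length ≤ k + fuel →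
      (PySem.List.pyRange (k : Int) (w.length : Int)).foldl
        (fun c j => if (x.1 < (pvZget w j).1 ∧ x.2 < (pvZget w j).2) ∨
                       (x.1 > (pvZget w j).1 ∧ x.2 > (pvZget w j).2) then c else c + 1) c
      = c + (((w.drop k).countP (pvNotConc x) : Nat) : Int) := by
  intro fuel
  induction fuel with
  | zero =>
      intro k c hk
      rw [pvRange_nil _ _ (by omega), List.drop_eq_nil_of_le (by omega)]
      simp
  | succ n ih =>
      intro k c hk
      by_cases hkn : k < w.length
      · rw [PySem.List.pyRange_one_cons (by exact_mod_cast hkn)]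
        simp only [List.foldl_cons]
        have hget : pvZget w (k : Int) = w[k] :=
          PySem.List.pyGetD_eq_getElem w _ (by omega) (by exact_mod_cast hkn)
        have hcast : ((k : Int) + 1) = ((k + 1 : Nat) : Int) := by omega
        rw [hcast, ih (k + 1) _ (by omega)]
        rw [List.drop_eq_getElem_cons hkn, List.countP_cons]
        have hiff : ((x.1 < w[k].1 ∧ x.2 < w[k].2) ∨ (x.1 > w[k].1 ∧ x.2 > w[k].2)) ↔
            pvNotConc x w[k] = false := by
          simp [pvNotConc]
          omega
        by_cases hcond : (x.1 < (pvZget w (k:Int)).1 ∧ x.2 < (pvZget w (k:Int)).2) ∨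
            (x.1 > (pvZget w (k:Int)).1 ∧ x.2 > (pvZget w (k:Int)).2)
        · rw [if_pos hcond]
          rw [hget] at hcond
          have : pvNotConc x w[k] = false := hiff.mp hcond
          simp [this]
        · rw [if_neg hcond]
          rw [hget] at hcond
          have : pvNotConc x w[k] = true := by
            cases hb : pvNotConc x w[k]
            · exact absurd (hiff.mpr hb) hcond
            · rfl
          simp [this]
          ring
      · rw [pvRange_nil _ _ (by omega), List.drop_eq_nil_of_le (by omega)]
        simp

lemma pvOuter (w : List (Int × Int)) :
    ∀ (fuel k : Nat) (c : Int), w.length ≤ k + 1 + fuel →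
      (PySem.List.pyRange (k : Int) ((w.length : Int) - 1)).foldl
        (fun c i =>
          (PySem.List.pyRange (i + 1) (w.length : Int)).foldl
            (fun c j => if ((pvZget w i).1 < (pvZget w j).1 ∧ (pvZget w i).2 < (pvZget w j).2) ∨
                           ((pvZget w i).1 > (pvZget w j).1 ∧ (pvZget w i).2 > (pvZget w j).2) then c
                        else c + 1) c) c
      = c + pvPc pvNotConc (w.drop k) := by
  intro fuel
  induction fuel with
  | zero =>
      intro k c hk
      rw [pvRange_nil _ _ (by omega)]
      have : (w.drop k).length ≤ 1 := by simp; omega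
      simp [pvPc_le_one _ _ this]
  | succ n ih =>
      intro k c hk
      by_cases hkn : k + 1 < w.length
      · rw [PySem.List.pyRange_one_cons (by omega)]
        simp only [List.foldl_cons]
        have hcast : ((k : Int) + 1) = ((k + 1 : Nat) : Int) := by omega
        rw [hcast, pvInner w _ (w.length) (k + 1) c (by omega)]
        rw [ih (k + 1) _ (by omega)]
        have hklt : k < w.length := by omega
        have hget : pvZget w (k : Int) = w[k] :=
          PySem.List.pyGetD_eq_getElem w _ (by omega) (by exact_mod_cast hklt)
        rw [List.drop_eq_getElem_cons hklt]
        simp only [pvPc, hget]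
        ring
      · rw [pvRange_nil _ _ (by omega)]
        have : (w.drop k).length ≤ 1 := by simp; omega
        simp [pvPc_le_one _ _ this]

lemma a_eq_pc (p q : List Int) (h : Pre_num_intersections p q) :
    num_intersections p q = pvPc pvNotConc (p.zip q) := by
  unfold Pre_num_intersections at h
  unfold num_intersections
  dsimp only
  by_cases hs : p.length ≤ 1
  · rw [pvRange_nil _ _ (by omega)]
    rw [pvPc_le_one _ _ (by simp [List.length_zip]; omega)]
    rfl
  · have hq : p.length ≤ q.length := by tauto
    have hzlen : (p.zip q).length = p.length := by simp [List.length_zip]; omega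
    have hpt : ∀ (t : Int), 0 ≤ t → t < (p.length : Int) →
        PySem.List.pyGetD p t 0 = (pvZget (p.zip q) t).1 ∧
        PySem.List.pyGetD q t 0 = (pvZget (p.zip q) t).2 := by
      intro t h0 h1
      have htp : t.toNat < p.length := by omega
      have htq : t.toNat < q.length := by omega
      have htw : t < ((p.zip q).length : Int) := by omega
      rw [PySem.List.pyGetD_eq_getElem p 0 h0 h1,
          PySem.List.pyGetD_eq_getElem q 0 h0 (by omega)]
      unfold pvZget
      rw [PySem.List.pyGetD_eq_getElem _ (0, 0) h0 htw]
      constructor <;> simp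
    refine (PySem.List.foldl_congr_mem _ _
      (fun c i =>
        (PySem.List.pyRange (i + 1) ((p.length : Int))).foldl
          (fun c j =>
            if ((pvZget (p.zip q) i).1 < (pvZget (p.zip q) j).1 ∧
                (pvZget (p.zip q) i).2 < (pvZget (p.zip q) j).2) ∨
               ((pvZget (p.zip q) i).1 > (pvZget (p.zip q) j).1 ∧
                (pvZget (p.zip q) i).2 > (pvZget (p.zip q) j).2) then c
            else c + 1) c) 0 ?_).trans ?_
    · intro c i hi
      rcases PySem.List.mem_pyRange_one.mp hi with ⟨hi0, hi1⟩
      apply PySem.List.foldl_congr_mem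
      intro acc j hj
      rcases PySem.List.mem_pyRange_one.mp hj with ⟨hj0, hj1⟩
      rcases hpt i hi0 (by omega) with ⟨hp1, hq1⟩
      rcases hpt j (by omega) (by omega) with ⟨hp2, hq2⟩
      rw [hp1, hq1, hp2, hq2]
    · have h0 := pvOuter (p.zip q) (p.zip q).length 0 0 (by omega)
      rw [hzlen] at h0
      simpa using h0

-- ===== VERDICT (by name: the statement is the Claim_ definition above) =====
theorem num_intersections_spec : Claim_equal_num_intersections := by
  intro p q _ hpre
  unfold Spec_num_intersections
  rw [a_eq_pc p q hpre, alt_eq_pc]
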